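-- pv_equiv track=rewrite | github.com/nsg-ethz/Magnifier | simulations/sim_util.py | compare_sets
-- ===== SOURCE A (Python) =====
-- def compare_sets(set_new, set_old):
--     """Compare elements present, added, and removed between
--     two versions of the same set.
--
--     set_new (set):
--         new version of a set
--     set_old (set):
--         old version of a set
--
--     returns:
--         n_new (int): number of elements in the new set
--         n_added (int): number of elements added in the new set
--         n_removed (int): number of elements removed from the old set
--     """
--
--     # count items that are no longer in the set
--     n_removed = 0
--     for item in set_old:
--         if item not in set_new:
--             n_removed += 1
--
--     # calculate number of new item
--     n_new = len(set_new)
--     n_old = len(set_old)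
--     n_added = n_new + n_removed - n_old
--
--     return n_new, n_added, n_removed
-- ===== SOURCE B (Python) =====
-- def compare_sets(set_new, set_old):
--     """Set-algebra version: each count is its own set difference."""
--     new_s = set(set_new)
--     old_s = set(set_old)
--     return len(new_s), len(new_s - old_s), len(old_s - new_s)
-- ===== Notes on version B (the rewrite author's own statement) =====
-- stated objective: idiomatic
-- what changed: Replaces the explicit membership-counting loop and the arithmetic identity n_added = n_new + n_removed - n_old with direct set algebra: n_added and n_removed are each computed independently as len of their own set difference.
import Mathlib
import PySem

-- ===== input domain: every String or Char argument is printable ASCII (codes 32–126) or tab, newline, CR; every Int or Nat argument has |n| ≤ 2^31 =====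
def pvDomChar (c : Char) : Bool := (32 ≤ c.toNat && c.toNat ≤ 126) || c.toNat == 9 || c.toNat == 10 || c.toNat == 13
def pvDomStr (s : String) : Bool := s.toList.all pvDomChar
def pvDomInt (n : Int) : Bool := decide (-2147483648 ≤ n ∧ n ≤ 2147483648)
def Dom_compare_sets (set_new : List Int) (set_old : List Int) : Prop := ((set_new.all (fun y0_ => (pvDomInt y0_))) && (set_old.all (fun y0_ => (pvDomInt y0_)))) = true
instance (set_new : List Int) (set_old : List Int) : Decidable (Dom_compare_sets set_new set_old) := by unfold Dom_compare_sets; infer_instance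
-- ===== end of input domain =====

-- B replaces A's membership-counting loop and arithmetic identity by direct set algebra
-- (each of the three counts is its own set/ set-difference size); idiomatic, same cost.

-- ===== PORT A =====
def compare_sets (set_new : List Int) (set_old : List Int) : Int × Int × Int :=
  -- count items that are no longer in the set
  let n_removed : Int := set_old.foldl (fun acc item => if item ∈ set_new then acc else acc + 1) 0
  -- calculate number of new item
  let n_new : Int := set_new.length
  let n_old : Int := set_old.length
  let n_added : Int := n_new + n_removed - n_old
  (n_new, n_added, n_removed)

-- ===== PORT B =====
def compare_sets_alt (set_new : List Int) (set_old : List Int) : Int × Int × Int :=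
  let new_s : PySem.Set Int := PySem.Set.ofList set_new
  let old_s : PySem.Set Int := PySem.Set.ofList set_old
  (PySem.Set.len new_s, PySem.Set.len (PySem.Set.diff new_s old_s), PySem.Set.len (PySem.Set.diff old_s new_s))

-- ===== PRECONDITION & SPEC =====
-- Pre_ restricts to the function's documented domain: the arguments are SETS, i.e. lists
-- without duplicate elements; on duplicate-bearing lists A mixes multiset lengths with set
-- membership counts and its value there is an artefact of passing a non-set.
def Pre_compare_sets (set_new : List Int) (set_old : List Int) : Prop :=
  set_new.Nodup ∧ set_old.Nodup
instance (set_new : List Int) (set_old : List Int) : Decidable (Pre_compare_sets set_new set_old) := by unfold Pre_compare_sets; infer_instance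

def pvWitness_compare_sets : List Int × List Int := ([1, 2, 3], [2, 4])

def Spec_compare_sets (set_new : List Int) (set_old : List Int) (out : Int × Int × Int) : Prop := out = compare_sets_alt set_new set_old
instance (set_new : List Int) (set_old : List Int) (out : Int × Int × Int) : Decidable (Spec_compare_sets set_new set_old out) := by unfold Spec_compare_sets; infer_instance

-- ===== CLAIM (what is proved, stated in full; the proofs are below) =====
def Claim_equal_compare_sets : Prop := ∀ (set_new : List Int) (set_old : List Int), Dom_compare_sets set_new set_old → Pre_compare_sets set_new set_old → Spec_compare_sets set_new set_old (compare_sets set_new set_old)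

-- ===== LEMMAS AND PROOFS =====

/-- Building a Python set from fresh elements just appends them. -/
lemma foldl_add_of_nodup (xs acc : List Int) (h : (acc ++ xs).Nodup) :
    xs.foldl PySem.Set.add acc = acc ++ xs := by
  induction xs generalizing acc with
  | nil => simp
  | cons x xs ih =>
    have hx : x ∉ acc := fun hm => (List.disjoint_of_nodup_append h) hm List.mem_cons_self
    have : PySem.Set.add acc x = acc ++ [x] := by
      simp [PySem.Set.add, List.contains_eq_mem, hx]
    rw [List.foldl_cons, this, ih (acc ++ [x]) (by simpa using h)]
    simp

lemma ofList_of_nodup (xs : List Int) (h : xs.Nodup) : PySem.Set.ofList xs = xs := by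
  simpa [PySem.Set.ofList, PySem.Set.empty] using foldl_add_of_nodup xs [] (by simpa using h)

lemma foldl_count (n o : List Int) (a : Int) :
    o.foldl (fun acc item => if item ∈ n then acc else acc + 1) a
      = a + ((o.filter (fun x => !decide (x ∈ n))).length : Int) := by
  induction o generalizing a with
  | nil => simp
  | cons x o ih =>
    by_cases hx : x ∈ n <;> simp [List.foldl_cons, hx, ih]; omega

lemma filter_mem_length_comm (n o : List Int) (hn : n.Nodup) (ho : o.Nodup) :
    (n.filter (fun x => decide (x ∈ o))).length = (o.filter (fun x => decide (x ∈ n))).length := by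
  have key : ∀ (a b : List Int), a.Nodup →
      (a.filter (fun x => decide (x ∈ b))).length = (a.toFinset ∩ b.toFinset).card := by
    intro a b ha
    have h1 : (a.filter (fun x => decide (x ∈ b))).toFinset.card
        = (a.filter (fun x => decide (x ∈ b))).length :=
      List.toFinset_card_of_nodup (ha.filter _)
    rw [← h1, List.toFinset_filter]
    congr 1
    ext x
    simp [Finset.mem_filter, List.mem_toFinset]
  rw [key n o hn, key o n ho, Finset.inter_comm]

lemma length_filter_split (l : List Int) (p : Int → Bool) :
    (l.filter p).length + (l.filter (fun x => !p x)).length = l.length := by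
  induction l with
  | nil => simp
  | cons x l ih => by_cases hx : p x <;> simp [hx] <;> omega

-- ===== VERDICT (by name: the statement is the Claim_ definition above) =====
theorem compare_sets_spec : Claim_equal_compare_sets := by
  intro n o _ hpre
  obtain ⟨hn, ho⟩ := hpre
  unfold Spec_compare_sets compare_sets compare_sets_alt
  rw [ofList_of_nodup n hn, ofList_of_nodup o ho]
  simp only [PySem.Set.len, PySem.Set.diff, PySem.Set.contains, List.contains_eq_mem]
  rw [foldl_count n o 0]
  refine Prod.ext rfl (Prod.ext ?_ (by push_cast; ring))
  have h1 := length_filter_split n (fun x => decide (x ∈ o))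
  have h2 := length_filter_split o (fun x => decide (x ∈ n))
  have h3 := filter_mem_length_comm n o hn ho
  simp only []
  omega
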